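-- pv_equiv track=rewrite | github.com/MrBrantCode/unitest_baseline | mut_generate/mist_train_cf/cf_510/solution.py | find_max_num
-- ===== SOURCE A (Python) =====
-- def find_max_num(nums):
--     max_num = None
--
--     for num in nums:
--         if num < 0 or num % 3 == 0:
--             continue
--
--         if max_num is None:
--             max_num = num
--         elif num > max_num:
--             max_num = num
--
--     return max_num
-- ===== SOURCE B (Python) =====
-- def find_max_num(nums):
--     eligible = [n for n in nums if n >= 0 and n % 3 != 0]
--     eligible.sort(reverse=True)
--     return eligible[0] if eligible else None
-- ===== Notes on version B (the rewrite author's own statement) =====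
-- stated objective: alternative
-- what changed: A's running-max scan with an Option accumulator is replaced by sort-based selection: filter the eligible values, sort them in descending order, and return the first element (None if empty).
import Mathlib
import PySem

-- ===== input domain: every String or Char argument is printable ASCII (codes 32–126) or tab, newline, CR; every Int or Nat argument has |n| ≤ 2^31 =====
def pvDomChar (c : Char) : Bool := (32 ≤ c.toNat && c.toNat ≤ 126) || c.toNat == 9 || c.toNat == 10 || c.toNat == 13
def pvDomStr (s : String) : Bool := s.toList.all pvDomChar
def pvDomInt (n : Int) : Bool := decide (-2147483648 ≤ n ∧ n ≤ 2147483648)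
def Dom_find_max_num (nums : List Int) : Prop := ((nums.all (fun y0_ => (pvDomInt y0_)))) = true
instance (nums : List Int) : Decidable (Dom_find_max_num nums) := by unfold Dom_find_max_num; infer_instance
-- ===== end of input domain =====

-- B replaces A's running-max scan by sort-based selection: filter, sort descending, take the first element (alternative algorithm, O(n log n)).

-- ===== PORT A =====
-- literal transliteration of A's loop: Option accumulator, skip num < 0 or num % 3 == 0
def find_max_num (nums : List Int) : Option Int :=
  nums.foldl (fun max_num num =>
    if num < 0 ∨ PySem.Int.mod num 3 = 0 then max_num
    else match max_num with
      | none => some num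
      | some m => if num > m then some num else max_num) none

-- ===== PORT B =====
-- filter comprehension, sort(reverse=True), then eligible[0] if eligible else None
def find_max_num_alt (nums : List Int) : Option Int :=
  let eligible := PySem.List.sorted
      (nums.filter (fun n => decide (0 ≤ n) && decide (PySem.Int.mod n 3 ≠ 0)))
      (fun y => y) true
  match eligible with
  | [] => none
  | m :: _ => some m

-- ===== PRECONDITION & SPEC =====
def Spec_find_max_num (nums : List Int) (out : Option Int) : Prop := out = find_max_num_alt nums
instance (nums : List Int) (out : Option Int) : Decidable (Spec_find_max_num nums out) := by unfold Spec_find_max_num; infer_instance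

-- ===== CLAIM =====
def Claim_equal_find_max_num : Prop := ∀ (nums : List Int), Dom_find_max_num nums → Spec_find_max_num nums (find_max_num nums)

-- ===== LEMMAS AND PROOFS =====

-- A's loop step applied to kept elements only
def pvMerge (acc : Option Int) (num : Int) : Option Int :=
  match acc with
  | none => some num
  | some m => if num > m then some num else acc

lemma pv_foldA_filter (nums : List Int) (acc : Option Int) :
    nums.foldl (fun max_num num =>
        if num < 0 ∨ PySem.Int.mod num 3 = 0 then max_num
        else match max_num with
          | none => some num
          | some m => if num > m then some num else max_num) acc
      = (nums.filter (fun n => decide (0 ≤ n) && decide (PySem.Int.mod n 3 ≠ 0))).foldl pvMerge acc := by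
  induction nums generalizing acc with
  | nil => rfl
  | cons x t ih =>
    simp only [List.foldl_cons, List.filter_cons]
    by_cases h : x < 0 ∨ PySem.Int.mod x 3 = 0
    · have hp : (decide (0 ≤ x) && decide (PySem.Int.mod x 3 ≠ 0)) = false := by
        rcases h with h | h
        · have h1 : decide (0 ≤ x) = false := decide_eq_false (by omega)
          rw [h1, Bool.false_and]
        · have h2 : decide (PySem.Int.mod x 3 ≠ 0) = false := decide_eq_false (by omega)
          rw [h2, Bool.and_false]
      rw [if_pos h, hp]
      exact ih acc
    · have h' : ¬ x < 0 ∧ ¬ PySem.Int.mod x 3 = 0 := by tauto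
      have hp : (decide (0 ≤ x) && decide (PySem.Int.mod x 3 ≠ 0)) = true := by
        rw [decide_eq_true (show (0:Int) ≤ x by omega), decide_eq_true h'.2, Bool.and_self]
      rw [if_neg h, hp]
      exact ih _

lemma pv_merge_max (x y : Int) : pvMerge (some x) y = some (max x y) := by
  simp only [pvMerge]
  split_ifs with h <;> (congr 1; omega)

lemma pv_fold_merge_some (t : List Int) (x : Int) :
    t.foldl pvMerge (some x) = some (t.foldl max x) := by
  induction t generalizing x with
  | nil => rfl
  | cons y t ih => simp only [List.foldl_cons, pv_merge_max]; exact ih _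

lemma pv_foldl_max_mem (t : List Int) (x : Int) : t.foldl max x ∈ x :: t := by
  induction t generalizing x with
  | nil => simp
  | cons y t ih =>
    simp only [List.foldl_cons]
    have hmem := ih (max x y)
    rcases List.mem_cons.mp hmem with h | h
    · rw [h]
      rcases max_choice x y with hm | hm <;> rw [hm] <;> simp
    · simp [h]

lemma pv_le_foldl_self (t : List Int) (x : Int) : x ≤ t.foldl max x := by
  induction t generalizing x with
  | nil => simp
  | cons z t ih => exact le_trans (le_max_left x z) (ih (max x z))

lemma pv_le_foldl_max (t : List Int) (x y : Int) (hy : y ∈ x :: t) : y ≤ t.foldl max x := by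
  induction t generalizing x with
  | nil => simp only [List.foldl_nil]; simp at hy; omega
  | cons z t ih =>
    simp only [List.foldl_cons]
    rcases List.mem_cons.mp hy with h | h
    · calc y = x := h
        _ ≤ max x z := le_max_left x z
        _ ≤ _ := pv_le_foldl_self t (max x z)
    · rcases List.mem_cons.mp h with h2 | h2
      · calc y = z := h2
          _ ≤ max x z := le_max_right x z
          _ ≤ _ := pv_le_foldl_self t (max x z)
      · exact ih (max x z) (List.mem_cons.mpr (Or.inr h2))

lemma pv_fold_merge_sorted (xs : List Int) :
    xs.foldl pvMerge none
      = (match PySem.List.sorted xs (fun y => y) true with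
         | [] => none
         | m :: _ => some m) := by
  cases hx : xs with
  | nil => rfl
  | cons x t =>
    have hlen : (PySem.List.sorted (x :: t) (fun y => y) true).length = (x :: t).length :=
      (PySem.List.sorted_perm _ _ _).length_eq
    cases hs : PySem.List.sorted (x :: t) (fun y => y) true with
    | nil => rw [hs] at hlen; simp at hlen
    | cons m s =>
      simp only [List.foldl_cons, pvMerge, pv_fold_merge_some]
      congr 1
      have hub : ∀ y ∈ (x :: t), y ≤ m := PySem.List.key_head_sorted_rev_ge (x :: t) (fun y => y) hs
      have hmem : m ∈ (x :: t) := by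
        have : m ∈ PySem.List.sorted (x :: t) (fun y => y) true := by rw [hs]; simp
        exact (PySem.List.mem_sorted _ _ _ _).mp this
      have h1 : t.foldl max x ≤ m := hub _ (pv_foldl_max_mem t x)
      have h2 : m ≤ t.foldl max x := pv_le_foldl_max t x m hmem
      omega

-- ===== VERDICT =====
theorem find_max_num_spec : Claim_equal_find_max_num := by
  intro nums _
  unfold Spec_find_max_num find_max_num find_max_num_alt
  rw [pv_foldA_filter, pv_fold_merge_sorted]
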